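-- pv_equiv track=rewrite | github.com/Klinterm/MTG-Owned-Cards-Deck-Assembled | v12.py | process_mana_symbols
-- ===== SOURCE A (Python) =====
-- def process_mana_symbols(mana_cost):
--     """Convert mana symbols to formatted text for display"""
--     if not mana_cost or not isinstance(mana_cost, str):
--         return mana_cost
--
--     # Create a text representation using Unicode circle symbols
--     # This will be displayed in the treeview
--     processed = ""
--     i = 0
--     while i < len(mana_cost):
--         if i + 2 < len(mana_cost):
--             if mana_cost[i:i + 3] == "{R}":
--                 processed += "(R)"  # Red mana
--                 i += 3
--                 continue
--             elif mana_cost[i:i + 3] == "{W}":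
--                 processed += "(W)"  # White mana
--                 i += 3
--                 continue
--             elif mana_cost[i:i + 3] == "{B}":
--                 processed += "(B)"  # Black mana
--                 i += 3
--                 continue
--             elif mana_cost[i:i + 3] == "{U}":
--                 processed += "(U)"  # Blue mana
--                 i += 3
--                 continue
--             elif mana_cost[i:i + 3] == "{G}":
--                 processed += "(G)"  # Green mana
--                 i += 3
--                 continue
--
--         # Handle other characters
--         if i < len(mana_cost):
--             if mana_cost[i] == "{":
--                 # Handle other mana symbols (like colorless)
--                 closing_idx = mana_cost.find("}", i)
--                 if closing_idx != -1:
--                     processed += f"({mana_cost[i + 1:closing_idx]})"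
--                     i = closing_idx + 1
--                 else:
--                     processed += mana_cost[i]
--                     i += 1
--             else:
--                 processed += mana_cost[i]
--                 i += 1
--
--     return processed
-- ===== SOURCE B (Python) =====
-- def process_mana_symbols(mana_cost):
--     """Convert mana symbols to formatted text for display"""
--     if not mana_cost or not isinstance(mana_cost, str):
--         return mana_cost
--
--     parts = []
--     rest = mana_cost
--     while True:
--         head, brace, tail = rest.partition("{")
--         parts.append(head)
--         if not brace:
--             break
--         inner, close, rest2 = tail.partition("}")
--         if not close:
--             parts.append("{" + tail)
--             break
--         parts.append("(" + inner + ")")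
--         rest = rest2
--     return "".join(parts)
-- ===== Notes on version B (the rewrite author's own statement) =====
-- stated objective: faster
-- what changed: Replaces the index-based while-loop with its five redundant per-colour branches and quadratic string += accumulation by a str.partition-driven scan that splits on '{' and '}' and joins the collected pieces once.
import Mathlib
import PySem

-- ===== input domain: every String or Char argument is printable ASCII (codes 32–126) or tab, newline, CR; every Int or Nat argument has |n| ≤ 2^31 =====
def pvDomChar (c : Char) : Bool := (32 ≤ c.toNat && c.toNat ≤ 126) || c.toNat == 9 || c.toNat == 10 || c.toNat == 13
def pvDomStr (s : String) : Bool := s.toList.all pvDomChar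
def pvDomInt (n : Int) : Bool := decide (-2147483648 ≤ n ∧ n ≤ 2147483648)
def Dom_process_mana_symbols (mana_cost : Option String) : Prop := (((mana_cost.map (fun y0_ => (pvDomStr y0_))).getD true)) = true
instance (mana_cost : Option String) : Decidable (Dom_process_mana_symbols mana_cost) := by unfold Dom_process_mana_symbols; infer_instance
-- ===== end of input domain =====

-- B replaces A's index-based while-loop (with five redundant per-colour branches) by a
-- partition-driven scan on '{' / '}'; return value equivalence, no side effects involved.

-- ===== PORT A =====
-- the while-loop over index i; `mana_cost.find("}", i)` is ported as `findIdx?` on the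
-- suffix `s.drop i` (exact: first '}' at index ≥ i, `none` = Python's -1);
-- `mana_cost[i+1:closing]` (both bounds in range) is `(s.drop (i+1)).take (j-1)`.
def aLoop (s : List Char) (i : Nat) : List Char :=
  if h : i < s.length then
    if i + 2 < s.length ∧ (s.drop i).take 3 = ['{', 'R', '}'] then
      '(' :: 'R' :: ')' :: aLoop s (i + 3)
    else if i + 2 < s.length ∧ (s.drop i).take 3 = ['{', 'W', '}'] then
      '(' :: 'W' :: ')' :: aLoop s (i + 3)
    else if i + 2 < s.length ∧ (s.drop i).take 3 = ['{', 'B', '}'] then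
      '(' :: 'B' :: ')' :: aLoop s (i + 3)
    else if i + 2 < s.length ∧ (s.drop i).take 3 = ['{', 'U', '}'] then
      '(' :: 'U' :: ')' :: aLoop s (i + 3)
    else if i + 2 < s.length ∧ (s.drop i).take 3 = ['{', 'G', '}'] then
      '(' :: 'G' :: ')' :: aLoop s (i + 3)
    else if s[i] = '{' then
      match (s.drop i).findIdx? (· == '}') with
      | some j => '(' :: ((s.drop (i + 1)).take (j - 1)) ++ ')' :: aLoop s (i + j + 1)
      | none => s[i] :: aLoop s (i + 1)
    else s[i] :: aLoop s (i + 1)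
  else []
termination_by s.length - i
decreasing_by all_goals omega

def process_mana_symbols (mana_cost : Option String) : Option String :=
  match mana_cost with
  | none => none                                   -- `not mana_cost` for None
  | some s => if s = "" then some s                -- `not mana_cost` for ""
              else some (String.mk (aLoop s.toList 0))

-- ===== PORT B =====
-- Source B's partition loop; `rest.partition("{")` (single-char separator) is ported exactly as
-- (takeWhile (· ≠ '{'), dropWhile (· ≠ '{')); the `parts` list joined by "" at the end is
-- the appended result.
def bLoop (rest : List Char) : List Char :=
  let head := rest.takeWhile (· ≠ '{')
  let tl := rest.dropWhile (· ≠ '{')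
  if hne : tl = [] then head                       -- no '{': partition's sep is empty, break
  else
    let tail := tl.tail                      -- partition's third component (after the '{')
    let inner := tail.takeWhile (· ≠ '}')
    let tl2 := tail.dropWhile (· ≠ '}')
    if hne2 : tl2 = [] then head ++ '{' :: tail     -- no '}': emit "{" + tail, break
    else head ++ '(' :: (inner ++ ')' :: bLoop tl2.tail)
termination_by rest.length
decreasing_by
  have h1 : (rest.dropWhile (· ≠ '{')).length ≤ rest.length := rest.length_dropWhile_le _
  have h2 : ((rest.dropWhile (· ≠ '{')).tail.dropWhile (· ≠ '}')).length ≤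
      (rest.dropWhile (· ≠ '{')).tail.length := List.length_dropWhile_le _ _
  have h5 : (rest.dropWhile (· ≠ '{')).length ≠ 0 := fun hz => hne (List.length_eq_zero_iff.mp hz)
  have h6 : ((rest.dropWhile (· ≠ '{')).tail.dropWhile (· ≠ '}')).length ≠ 0 :=
    fun hz => hne2 (List.length_eq_zero_iff.mp hz)
  simp only [List.length_tail] at *
  omega

def process_mana_symbols_alt (mana_cost : Option String) : Option String :=
  match mana_cost with
  | none => none
  | some s => if s = "" then some s
              else some (String.mk (bLoop s.toList))

-- ===== PRECONDITION & SPEC =====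
def Spec_process_mana_symbols (mana_cost : Option String) (out : Option String) : Prop := out = process_mana_symbols_alt mana_cost
instance (mana_cost : Option String) (out : Option String) : Decidable (Spec_process_mana_symbols mana_cost out) := by unfold Spec_process_mana_symbols; infer_instance

-- ===== CLAIM (what is proved, stated in full; the proofs are below) =====
def Claim_equal_process_mana_symbols : Prop := ∀ (mana_cost : Option String), Dom_process_mana_symbols mana_cost → Spec_process_mana_symbols mana_cost (process_mana_symbols mana_cost)

-- ===== LEMMAS AND PROOFS =====

-- copying a non-'{' character commutes with bLoop
theorem bLoop_cons_ne (c : Char) (t : List Char) (hc : c ≠ '{') :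
    bLoop (c :: t) = c :: bLoop t := by
  conv_rhs => rw [bLoop]
  rw [bLoop]
  simp only [List.takeWhile_cons, List.dropWhile_cons, hc, ne_eq, not_false_eq_true,
    decide_true, if_true]
  split_ifs <;> simp

-- an unmatched '{' suffix is copied verbatim by bLoop
theorem bLoop_open_no_close (t : List Char) (ht : ∀ c ∈ t, c ≠ '}') :
    bLoop ('{' :: t) = '{' :: t := by
  rw [bLoop]
  have hdw : t.dropWhile (· ≠ '}') = [] := by
    rw [List.dropWhile_eq_nil_iff]
    intro x hx; simpa using ht x hx
  simp [hdw]
  exact fun hm => ht '}' hm rfl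

-- a complete symbol at the front of bLoop's input
theorem bLoop_symbol (x : Char) (t : List Char) (hx : x ≠ '}') :
    bLoop ('{' :: x :: '}' :: t) = '(' :: x :: ')' :: bLoop t := by
  rw [bLoop]
  simp [hx]

-- the generic case: '{', a '}'-free body, '}' and a remainder
theorem bLoop_open_close (t u : List Char) (ht : ∀ c ∈ t, c ≠ '}') :
    bLoop ('{' :: (t ++ '}' :: u)) = '(' :: (t ++ ')' :: bLoop u) := by
  have htk : (t ++ '}' :: u).takeWhile (· ≠ '}') = t := by
    induction t with
    | nil => simp [List.takeWhile_cons]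
    | cons c t' ihT =>
      simp only [List.cons_append, List.takeWhile_cons]
      rw [if_pos (by simpa using ht c List.mem_cons_self), ihT]
      intro c' hc'; exact ht c' (List.mem_cons_of_mem _ hc')
  have hdw : (t ++ '}' :: u).dropWhile (· ≠ '}') = '}' :: u := by
    clear htk
    induction t with
    | nil => simp [List.dropWhile_cons]
    | cons c t' ihT =>
      simp only [List.cons_append, List.dropWhile_cons]
      rw [if_pos (by simpa using ht c List.mem_cons_self)]
      exact ihT fun c' hc' => ht c' (List.mem_cons_of_mem _ hc')
  simp only [ne_eq, decide_not] at htk hdw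
  rw [bLoop]
  rw [dif_neg (by simp [List.dropWhile_cons])]
  simp [List.dropWhile_cons, List.takeWhile_cons, htk, hdw]

-- findIdx? vs takeWhile/dropWhile for the single character '}'
theorem find_take_drop : ∀ (l : List Char) (j : Nat), l.findIdx? (· == '}') = some j →
    l.takeWhile (· ≠ '}') = l.take j ∧ l.dropWhile (· ≠ '}') = '}' :: l.drop (j + 1) := by
  intro l
  induction l with
  | nil => intro j h; simp at h
  | cons c t ih =>
    intro j h
    by_cases hc : c = '}'
    · subst hc
      simp [List.findIdx?_cons] at h
      subst h
      simp
    · rw [List.findIdx?_cons] at h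
      simp [hc] at h
      obtain ⟨j', hj', rfl⟩ := h
      obtain ⟨h1, h2⟩ := ih j' hj'
      simp only [ne_eq, decide_not] at h1 h2
      simp [List.takeWhile_cons, List.dropWhile_cons, hc, h1, h2]

-- with no '}' in the remaining suffix, aLoop copies it verbatim
theorem aLoop_no_close : ∀ (n : Nat) (s : List Char) (i : Nat), s.length ≤ i + n →
    (∀ c ∈ s.drop i, c ≠ '}') → aLoop s i = s.drop i := by
  intro n
  induction n with
  | zero =>
    intro s i hn _
    rw [aLoop]
    rw [dif_neg (by omega)]
    rw [List.drop_eq_nil_of_le (by omega)]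
  | succ n ih =>
    intro s i hn hno
    by_cases h : i < s.length
    · have hdropc : s.drop i = s[i] :: s.drop (i + 1) := List.drop_eq_getElem_cons h
      have hclose : ('}' : Char) ∉ s.drop i := fun hm => hno '}' hm rfl
      -- every color branch would need '}' inside `s.drop i`
      have htri : ∀ x : Char, ¬ (i + 2 < s.length ∧ (s.drop i).take 3 = ['{', x, '}']) := by
        rintro x ⟨-, htk⟩
        exact hclose (List.mem_of_mem_take (by rw [htk]; simp))
      have hfind : (s.drop i).findIdx? (· == '}') = none := by
        rw [List.findIdx?_eq_none_iff]
        intro x hx; simpa using hno x hx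
      rw [aLoop, dif_pos h, if_neg (htri 'R'), if_neg (htri 'W'), if_neg (htri 'B'),
        if_neg (htri 'U'), if_neg (htri 'G')]
      have hrec : aLoop s (i + 1) = s.drop (i + 1) := by
        apply ih s (i + 1) (by omega)
        intro c hc
        exact hno c (by rw [hdropc]; exact List.mem_cons_of_mem _ hc)
      by_cases hb : s[i] = '{'
      · rw [if_pos hb, hfind]
        rw [hrec, hdropc]
      · rw [if_neg hb, hrec, hdropc]
    · rw [aLoop, dif_neg h, List.drop_eq_nil_of_le (by omega)]

theorem aLoop_eq_bLoop : ∀ (n : Nat) (s : List Char) (i : Nat), s.length ≤ i + n →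
    aLoop s i = bLoop (s.drop i) := by
  intro n
  induction n with
  | zero =>
    intro s i hn
    rw [aLoop, dif_neg (by omega), List.drop_eq_nil_of_le (by omega), bLoop]
    simp
  | succ n ih =>
    intro s i hn
    by_cases h : i < s.length
    · have hdropc : s.drop i = s[i] :: s.drop (i + 1) := List.drop_eq_getElem_cons h
      rw [aLoop, dif_pos h]
      by_cases hb : s[i] = '{'
      · -- the current character is '{'
        have hfindc : (s.drop i).findIdx? (· == '}') =
            ((s.drop (i + 1)).findIdx? (· == '}')).map (· + 1) := by
          rw [hdropc, List.findIdx?_cons]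
          simp [hb]
        -- a color branch: the triple is {x} with x ∈ {R,W,B,U,G}
        have hcolor : ∀ x : Char, x ≠ '}' →
            (i + 2 < s.length ∧ (s.drop i).take 3 = ['{', x, '}']) →
            '(' :: x :: ')' :: aLoop s (i + 3) = bLoop (s.drop i) := by
          rintro x hx ⟨hlen, htk⟩
          have hsplit : s.drop i = '{' :: x :: '}' :: s.drop (i + 3) := by
            have : s.drop i = (s.drop i).take 3 ++ (s.drop i).drop 3 := by simp
            rw [htk] at this
            rw [this, List.drop_drop]
            norm_num
          rw [hsplit, bLoop_symbol x _ hx]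
          rw [ih s (i + 3) (by omega)]
        by_cases hR : i + 2 < s.length ∧ (s.drop i).take 3 = ['{', 'R', '}']
        · rw [if_pos hR]; exact hcolor 'R' (by decide) hR
        rw [if_neg hR]
        by_cases hW : i + 2 < s.length ∧ (s.drop i).take 3 = ['{', 'W', '}']
        · rw [if_pos hW]; exact hcolor 'W' (by decide) hW
        rw [if_neg hW]
        by_cases hB : i + 2 < s.length ∧ (s.drop i).take 3 = ['{', 'B', '}']
        · rw [if_pos hB]; exact hcolor 'B' (by decide) hB
        rw [if_neg hB]
        by_cases hU : i + 2 < s.length ∧ (s.drop i).take 3 = ['{', 'U', '}']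
        · rw [if_pos hU]; exact hcolor 'U' (by decide) hU
        rw [if_neg hU]
        by_cases hG : i + 2 < s.length ∧ (s.drop i).take 3 = ['{', 'G', '}']
        · rw [if_pos hG]; exact hcolor 'G' (by decide) hG
        rw [if_neg hG, if_pos hb]
        -- generic '{' handling
        cases hf : (s.drop (i + 1)).findIdx? (· == '}') with
        | none =>
          rw [hfindc, hf]
          have hno : ∀ c ∈ s.drop (i + 1), c ≠ '}' := by
            intro c hc hceq
            subst hceq
            have := List.findIdx?_eq_none_iff.mp hf '}' hc
            simp at this
          simp only [Option.map_none]
          rw [aLoop_no_close (n + 1) s (i + 1) (by omega) hno]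
          rw [hdropc, hb, bLoop_open_no_close _ hno]
        | some j' =>
          rw [hfindc, hf]
          simp only [Option.map_some]
          obtain ⟨htk, hdw⟩ := find_take_drop (s.drop (i + 1)) j' hf
          have hdecomp : s.drop (i + 1) =
              (s.drop (i + 1)).take j' ++ '}' :: (s.drop (i + 1)).drop (j' + 1) := by
            conv_lhs => rw [← List.takeWhile_append_dropWhile
              (p := fun c => decide (c ≠ '}')) (l := s.drop (i + 1))]
            rw [htk, hdw]
          have hallt : ∀ c ∈ (s.drop (i + 1)).take j', c ≠ '}' := by
            intro c hc
            have hmem : c ∈ (s.drop (i + 1)).takeWhile (· ≠ '}') := by rw [htk]; exact hc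
            simpa using List.mem_takeWhile_imp hmem
          rw [hdropc, hb]
          conv_rhs => rw [hdecomp]
          rw [bLoop_open_close _ _ hallt]
          have hdrop2 : (s.drop (i + 1)).drop (j' + 1) = s.drop (i + (j' + 1) + 1) := by
            rw [List.drop_drop]; ring_nf
          rw [hdrop2, ← ih s (i + (j' + 1) + 1) (by omega)]
          have hj : j' + 1 - 1 = j' := by omega
          rw [hj, List.cons_append]
      · -- ordinary character
        have htri : ∀ x : Char, ¬ (i + 2 < s.length ∧ (s.drop i).take 3 = ['{', x, '}']) := by
          rintro x ⟨-, htk⟩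
          apply hb
          have : (s.drop i).take 3 = s[i] :: (s.drop (i + 1)).take 2 := by
            conv_lhs => rw [hdropc]
            rfl
          rw [this] at htk
          exact (List.cons.injEq _ _ _ _ ▸ htk).1
        rw [if_neg (htri 'R'), if_neg (htri 'W'), if_neg (htri 'B'), if_neg (htri 'U'),
          if_neg (htri 'G'), if_neg hb]
        rw [ih s (i + 1) (by omega)]
        rw [hdropc, bLoop_cons_ne _ _ hb]
    · rw [aLoop, dif_neg h, List.drop_eq_nil_of_le (by omega), bLoop]
      simp

-- ===== VERDICT (by name: the statement is the Claim_ definition above) =====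
theorem process_mana_symbols_spec : Claim_equal_process_mana_symbols := by
  intro mana_cost _
  unfold Spec_process_mana_symbols process_mana_symbols process_mana_symbols_alt
  match mana_cost with
  | none => rfl
  | some s =>
    simp only []
    split_ifs with h
    · rfl
    · have := aLoop_eq_bLoop s.toList.length s.toList 0 (by omega)
      simp at this
      rw [this]
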